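-- pv_equiv track=rewrite | github.com/monocle-h2020/sosbox | GPS_ublox7.py | OrderData
-- ===== SOURCE A (Python) =====
-- def OrderData(splitData, listOfData, NMEA_TAGS, GPRMC):
--     """
--     Go through the data entered, and sort it into a list that is appropriate for sending to the sensor manager.
--     Extract the important data into the first few elements, then store the raw lines into their own elements, sorted by type of NMEA tag.
--     """
--     for lineOfData in splitData:
--         code = lineOfData[:6]
--         code = code[1:]
--         lineOfData = lineOfData.split(",")
--         for x in range(len(NMEA_TAGS)):
--             if(code == "GPRMC"):
--                 listOfData[2] = lineOfData[3]
--                 listOfData[3] = lineOfData[4]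
--                 listOfData[4] = lineOfData[5]
--                 listOfData[5] = lineOfData[6]
--                 listOfData[0] = lineOfData[1]
--                 listOfData[1] = lineOfData[9]
--                 listOfData[7] = GPRMC + ",".join(lineOfData)
--             elif(NMEA_TAGS[x][0] == code):
--                 listOfData[x+8] = listOfData[x+8] + ",".join(lineOfData)
--
--     return(listOfData)
-- ===== SOURCE B (Python) =====
-- def OrderData(splitData, listOfData, NMEA_TAGS, GPRMC):
--     """
--     Single pass over the lines: GPRMC lines update the fixed slots directly
--     (last one wins); every other line is appended to a per-code group string.
--     A second pass over the tags then appends each tag's group (if any) to its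
--     slot.  Mutates listOfData in place and returns it, like the original,
--     and like the original does nothing when the tag table is empty.
--     """
--     if not NMEA_TAGS:
--         return listOfData
--     groups = {}
--     for line in splitData:
--         code = line[1:6]
--         fields = line.split(",")
--         if code == "GPRMC":
--             listOfData[2] = fields[3]
--             listOfData[3] = fields[4]
--             listOfData[4] = fields[5]
--             listOfData[5] = fields[6]
--             listOfData[0] = fields[1]
--             listOfData[1] = fields[9]
--             listOfData[7] = GPRMC + ",".join(fields)
--         else:
--             groups[code] = groups.get(code, "") + ",".join(fields)
--     if groups:
--         for x, tag in enumerate(NMEA_TAGS):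
--             if tag[0] in groups:
--                 listOfData[x + 8] = listOfData[x + 8] + groups[tag[0]]
--     return listOfData
-- ===== Notes on version B (the rewrite author's own statement) =====
-- stated objective: faster
-- what changed: Inverts the nesting: one pass over the lines that handles GPRMC slots inline and accumulates non-GPRMC lines into a code->concatenation dict, then one pass over NMEA_TAGS appending each tag's group, instead of A's per-line rescan of the whole tag list.
import Mathlib
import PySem

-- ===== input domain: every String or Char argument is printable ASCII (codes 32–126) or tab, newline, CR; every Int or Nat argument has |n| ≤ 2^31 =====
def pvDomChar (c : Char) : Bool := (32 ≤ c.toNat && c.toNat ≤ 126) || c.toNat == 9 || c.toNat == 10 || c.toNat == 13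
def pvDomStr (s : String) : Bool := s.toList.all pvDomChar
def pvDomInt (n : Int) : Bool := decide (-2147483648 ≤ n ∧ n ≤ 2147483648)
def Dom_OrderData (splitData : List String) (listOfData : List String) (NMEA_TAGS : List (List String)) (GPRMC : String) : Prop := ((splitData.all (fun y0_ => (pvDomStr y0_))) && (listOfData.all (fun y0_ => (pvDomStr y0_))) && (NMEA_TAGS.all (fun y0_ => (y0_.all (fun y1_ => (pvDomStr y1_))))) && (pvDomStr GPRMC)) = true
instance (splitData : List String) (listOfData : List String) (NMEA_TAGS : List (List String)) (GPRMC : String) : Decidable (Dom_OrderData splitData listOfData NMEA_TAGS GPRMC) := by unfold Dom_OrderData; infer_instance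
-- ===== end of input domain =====

-- B inverts A's nesting (one pass over the lines grouping non-GPRMC lines by code into a dict,
-- then one pass over the tags), removing the per-line rescan of the tag list; both mutate
-- listOfData in place in Python, and the equivalence proved here is about the returned list.


-- ===== PORT A =====
-- lineOfData.split(",")  (split? is total here: the separator "," is non-empty)
def pvFields (line : String) : List String :=
  (PySem.Str.split? line ",").getD []

-- code = lineOfData[:6]; code = code[1:]
def pvCode (line : String) : String :=
  PySem.Str.slice (PySem.Str.slice line none (some 6)) (some 1) none

-- the six fixed-slot assignments plus listOfData[7] of the GPRMC branch (shared text of Source A and Source B)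
def pvGPRMCWrite (lod : List String) (fields : List String) (GPRMC : String) : List String :=
  ((((((lod.set 2 (fields.getD 3 "")).set 3 (fields.getD 4 "")).set 4
        (fields.getD 5 "")).set 5 (fields.getD 6 "")).set 0 (fields.getD 1 "")).set 1
      (fields.getD 9 "")).set 7 (GPRMC ++ PySem.Str.join "," fields)

-- A's inner loop 'for x in range(len(NMEA_TAGS))' (iteration x reads NMEA_TAGS[x]),
-- rendered as structural recursion over NMEA_TAGS carrying the counter x
def pvInnerA (GPRMC code : String) (fields : List String) : Nat → List (List String) → List String → List String
  | _, [], lod => lod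
  | x, t :: ts, lod =>
      pvInnerA GPRMC code fields (x + 1) ts
        (if code = "GPRMC" then pvGPRMCWrite lod fields GPRMC
         else if t.getD 0 "" = code then
           lod.set (x + 8) (lod.getD (x + 8) "" ++ PySem.Str.join "," fields)
         else lod)

def OrderData (splitData : List String) (listOfData : List String) (NMEA_TAGS : List (List String)) (GPRMC : String) : List String :=
  splitData.foldl
    (fun lod line => pvInnerA GPRMC (pvCode line) (pvFields line) 0 NMEA_TAGS lod)
    listOfData

-- ===== PORT B =====
-- Source B's code = line[1:6]
def pvCodeB (line : String) : String :=
  PySem.Str.slice line (some 1) (some 6)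

-- first pass of Source B: GPRMC slots written inline, other lines grouped into the dict
def pvStepB (GPRMC : String) (st : List String × PySem.Dict String String) (line : String) :
    List String × PySem.Dict String String :=
  let code := pvCodeB line
  let fields := pvFields line
  if code = "GPRMC" then (pvGPRMCWrite st.1 fields GPRMC, st.2)
  else (st.1, st.2.insert code (st.2.getD code "" ++ PySem.Str.join "," fields))

-- second pass of Source B: 'for x, tag in enumerate(NMEA_TAGS): if tag[0] in groups: …'
def pvFinishB (g : PySem.Dict String String) : Nat → List (List String) → List String → List String
  | _, [], lod => lod
  | x, t :: ts, lod =>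
      pvFinishB g (x + 1) ts
        (match g.get? (t.getD 0 "") with
         | some s => lod.set (x + 8) (lod.getD (x + 8) "" ++ s)
         | none => lod)

def OrderData_alt (splitData : List String) (listOfData : List String) (NMEA_TAGS : List (List String)) (GPRMC : String) : List String :=
  if NMEA_TAGS = [] then listOfData
  else
    let st := splitData.foldl (pvStepB GPRMC) (listOfData, PySem.Dict.empty)
    if st.2.items = [] then st.1 else pvFinishB st.2 0 NMEA_TAGS st.1

-- ===== PRECONDITION & SPEC =====
-- Pre_ excludes EXACTLY the inputs on which the Python A raises IndexError: an empty tag entry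
-- that a non-GPRMC line makes the inner loop read, a GPRMC line (reached because NMEA_TAGS is
-- non-empty) with fewer than 10 fields or fewer than 8 slots, and a matching tag whose slot
-- x+8 is out of range.  A returns on every input admitted here, and so does B.
def Pre_OrderData (splitData : List String) (listOfData : List String) (NMEA_TAGS : List (List String)) (GPRMC : String) : Prop :=
  ((∃ line ∈ splitData, pvCode line ≠ "GPRMC") → ∀ t ∈ NMEA_TAGS, t ≠ []) ∧
  (NMEA_TAGS ≠ [] → ∀ line ∈ splitData, pvCode line = "GPRMC" →
      10 ≤ (pvFields line).length ∧ 8 ≤ listOfData.length) ∧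
  (∀ line ∈ splitData, pvCode line ≠ "GPRMC" →
      ∀ x < NMEA_TAGS.length, (NMEA_TAGS.getD x []).getD 0 "" = pvCode line →
        x + 8 < listOfData.length)
instance (splitData : List String) (listOfData : List String) (NMEA_TAGS : List (List String)) (GPRMC : String) : Decidable (Pre_OrderData splitData listOfData NMEA_TAGS GPRMC) := by
  unfold Pre_OrderData; infer_instance
def pvWitness_OrderData : List String × List String × List (List String) × String :=
  (["$GPGGA,a,b", "$GPRMC,T,A,1,N,2,E,3,4,D"],
   ["", "", "", "", "", "", "", "", "", ""],
   [["GPGGA"], ["GPGSV"]], "P:")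

def Spec_OrderData (splitData : List String) (listOfData : List String) (NMEA_TAGS : List (List String)) (GPRMC : String) (out : List String) : Prop :=
  out = OrderData_alt splitData listOfData NMEA_TAGS GPRMC
instance (splitData : List String) (listOfData : List String) (NMEA_TAGS : List (List String)) (GPRMC : String) (out : List String) : Decidable (Spec_OrderData splitData listOfData NMEA_TAGS GPRMC out) := by
  unfold Spec_OrderData; infer_instance

-- ===== CLAIM (what is proved, stated in full; the proofs are below) =====
def Claim_equal_OrderData : Prop := ∀ (splitData : List String) (listOfData : List String) (NMEA_TAGS : List (List String)) (GPRMC : String), Dom_OrderData splitData listOfData NMEA_TAGS GPRMC → Pre_OrderData splitData listOfData NMEA_TAGS GPRMC → Spec_OrderData splitData listOfData NMEA_TAGS GPRMC (OrderData splitData listOfData NMEA_TAGS GPRMC)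

-- ===== LEMMAS AND PROOFS =====

-- both ports extract the same five-character code
theorem pvCodeB_eq (line : String) : pvCodeB line = pvCode line := by
  unfold pvCodeB pvCode
  simp only [PySem.Str.slice, String.toList_ofList]
  apply congrArg String.ofList
  show PySem.List.slice line.toList (some 1) (some 6)
    = PySem.List.slice (PySem.List.slice line.toList none (some 6)) (some 1) none
  rw [show ((1:Int)) = ((1:Nat):Int) by norm_num, show ((6:Int)) = ((6:Nat):Int) by norm_num]
  rw [PySem.List.slice_natCast, PySem.List.slice_to_natCast, PySem.List.slice_from_natCast,
      List.drop_take]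

-- pointwise value of the seven constant writes of pvGPRMCWrite
def pvWFun (fields : List String) (GPRMC : String) (i : Nat) (old : String) : String :=
  if i = 0 then fields.getD 1 ""
  else if i = 1 then fields.getD 9 ""
  else if i = 2 then fields.getD 3 ""
  else if i = 3 then fields.getD 4 ""
  else if i = 4 then fields.getD 5 ""
  else if i = 5 then fields.getD 6 ""
  else if i = 7 then GPRMC ++ PySem.Str.join "," fields
  else old

theorem pvSet_const_get (l : List String) (j i : Nat) (v : String) :
    (l.set j v)[i]? = if i = j then (l[i]?).map (fun _ => v) else l[i]? := by
  rw [List.getElem?_set]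
  by_cases h : i = j
  · subst h
    rw [if_pos rfl, if_pos rfl]
    by_cases hl : i < l.length
    · rw [if_pos hl, List.getElem?_eq_getElem hl]; rfl
    · rw [if_neg hl, List.getElem?_eq_none (Nat.le_of_not_lt hl)]; rfl
  · rw [if_neg (fun hh => h hh.symm), if_neg h]

theorem pvSet_append_get (l : List String) (j i : Nat) (s : String) :
    (l.set j (l.getD j "" ++ s))[i]? = if i = j then (l[i]?).map (· ++ s) else l[i]? := by
  rw [pvSet_const_get]
  by_cases h : i = j
  · subst h
    simp only [List.getD_eq_getElem?_getD]
    cases l[i]? <;> simp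
  · simp [h]

theorem pvW_get (lod fields : List String) (G : String) (i : Nat) :
    (pvGPRMCWrite lod fields G)[i]? = (lod[i]?).map (pvWFun fields G i) := by
  unfold pvGPRMCWrite
  simp only [pvSet_const_get]
  by_cases h0 : i = 0 <;> by_cases h1 : i = 1 <;> by_cases h2 : i = 2 <;>
    by_cases h3 : i = 3 <;> by_cases h4 : i = 4 <;> by_cases h5 : i = 5 <;>
    by_cases h7 : i = 7 <;>
  simp_all [pvWFun] <;> (first | rfl | (congr 1; funext w; simp [pvWFun]) | (cases lod[i]? <;> simp [pvWFun, *]))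

theorem pvWFun_high (fields : List String) (G : String) (i : Nat) (h : 8 ≤ i) (old : String) :
    pvWFun fields G i old = old := by
  unfold pvWFun; split_ifs <;> first | rfl | omega

theorem pvW_idem (lod fields : List String) (G : String) :
    pvGPRMCWrite (pvGPRMCWrite lod fields G) fields G = pvGPRMCWrite lod fields G := by
  apply List.ext_getElem?
  intro i
  simp only [pvW_get, Option.map_map]
  cases lod[i]? with
  | none => rfl
  | some a =>
      simp only [Option.map_some, Function.comp]
      congr 1
      unfold pvWFun; split_ifs <;> rfl

theorem pvInnerA_gprmc (G : String) (fields : List String) :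
    ∀ (ts : List (List String)) (x : Nat) (lod : List String), ts ≠ [] →
      pvInnerA G "GPRMC" fields x ts lod = pvGPRMCWrite lod fields G := by
  intro ts
  induction ts with
  | nil => intro x lod h; exact absurd rfl h
  | cons t ts ih =>
      intro x lod _
      show pvInnerA G "GPRMC" fields (x + 1) ts
            (if ("GPRMC" : String) = "GPRMC" then pvGPRMCWrite lod fields G
             else if t.getD 0 "" = "GPRMC" then
               lod.set (x + 8) (lod.getD (x + 8) "" ++ PySem.Str.join "," fields)
             else lod) = pvGPRMCWrite lod fields G
      rw [if_pos rfl]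
      cases ts with
      | nil => rfl
      | cons u us => rw [ih (x + 1) (pvGPRMCWrite lod fields G) (by simp), pvW_idem]

theorem pvFinishB_W (g : PySem.Dict String String) (fields : List String) (G : String) :
    ∀ (ts : List (List String)) (x : Nat) (lod : List String),
      pvFinishB g x ts (pvGPRMCWrite lod fields G)
        = pvGPRMCWrite (pvFinishB g x ts lod) fields G := by
  intro ts
  induction ts with
  | nil => intro x lod; rfl
  | cons t ts ih =>
      intro x lod
      simp only [pvFinishB]
      cases hg : g.get? (t.getD 0 "") with
      | none => exact ih (x + 1) lod
      | some s =>
          have hcomm : (pvGPRMCWrite lod fields G).set (x + 8)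
              ((pvGPRMCWrite lod fields G).getD (x + 8) "" ++ s)
              = pvGPRMCWrite (lod.set (x + 8) (lod.getD (x + 8) "" ++ s)) fields G := by
            apply List.ext_getElem?
            intro i
            simp only [pvSet_append_get, pvW_get]
            by_cases h : i = x + 8
            · subst h
              cases lod[x + 8]? <;> simp [pvWFun_high fields G (x + 8) (by omega)]
            · simp [h]
          show pvFinishB g (x + 1) ts ((pvGPRMCWrite lod fields G).set (x + 8)
              ((pvGPRMCWrite lod fields G).getD (x + 8) "" ++ s))
            = pvGPRMCWrite (pvFinishB g (x + 1) ts (lod.set (x + 8) (lod.getD (x + 8) "" ++ s))) fields G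
          rw [hcomm]
          exact ih (x + 1) _

-- the common shape of a pvFinishB position: append the group (if present) to the old value
def pvApp (o : Option String) (v : Option String) : Option String :=
  match o with
  | some s => v.map (· ++ s)
  | none => v

theorem pvFinishB_get (g : PySem.Dict String String) :
    ∀ (ts : List (List String)) (x : Nat) (lod : List String) (i : Nat),
      (pvFinishB g x ts lod)[i]?
        = if x + 8 ≤ i ∧ i - (x + 8) < ts.length then
            pvApp (g.get? ((ts.getD (i - (x + 8)) []).getD 0 "")) lod[i]?
          else lod[i]? := by
  intro ts
  induction ts with
  | nil => intro x lod i; simp [pvFinishB]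
  | cons t ts ih =>
      intro x lod i
      show (pvFinishB g (x + 1) ts
            (match g.get? (t.getD 0 "") with
             | some s => lod.set (x + 8) (lod.getD (x + 8) "" ++ s)
             | none => lod))[i]? = _
      rw [ih (x + 1) _ i]
      by_cases hlo : x + 8 ≤ i
      · by_cases heq : i = x + 8
        · subst heq
          have h1 : ¬ (x + 1 + 8 ≤ x + 8 ∧ x + 8 - (x + 1 + 8) < ts.length) := by omega
          rw [if_neg h1]
          have h2 : (x + 8 ≤ x + 8 ∧ x + 8 - (x + 8) < (t :: ts).length) := by simp
          rw [if_pos h2]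
          have : x + 8 - (x + 8) = 0 := by omega
          rw [this]
          cases hg : g.get? ((t :: ts).getD 0 []|>.getD 0 "") with
          | none =>
              simp only [List.getD_cons_zero] at hg ⊢
              rw [hg]; rfl
          | some s =>
              simp only [List.getD_cons_zero] at hg ⊢
              rw [hg]
              simp only [pvApp]
              rw [pvSet_append_get, if_pos rfl]
        · have hgt : x + 1 + 8 ≤ i := by omega
          have hsub : i - (x + 1 + 8) + 1 = i - (x + 8) := by omega
          have hts : (i - (x + 1 + 8) < ts.length) ↔ (i - (x + 8) < (t :: ts).length) := by
            simp; omega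
          have hGetD : ts.getD (i - (x + 1 + 8)) [] = (t :: ts).getD (i - (x + 8)) [] := by
            rw [← hsub]; rfl
          have hMatch : (match g.get? (t.getD 0 "") with
             | some s => lod.set (x + 8) (lod.getD (x + 8) "" ++ s)
             | none => lod)[i]? = lod[i]? := by
            cases g.get? (t.getD 0 "") with
            | none => rfl
            | some s => rw [pvSet_append_get, if_neg heq]
          by_cases hr : i - (x + 1 + 8) < ts.length
          · rw [if_pos ⟨hgt, hr⟩, if_pos ⟨hlo, hts.mp hr⟩, hGetD, hMatch]
          · rw [if_neg (by omega), if_neg (fun hc => hr (by omega : i - (x+1+8) < ts.length)), hMatch]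
      · rw [if_neg (by omega), if_neg (by omega)]
        cases g.get? (t.getD 0 "") with
        | none => rfl
        | some s => rw [pvSet_append_get, if_neg (by omega)]

theorem pvInnerA_get (G c : String) (fields : List String) (hc : c ≠ "GPRMC") :
    ∀ (ts : List (List String)) (x : Nat) (lod : List String) (i : Nat),
      (pvInnerA G c fields x ts lod)[i]?
        = if x + 8 ≤ i ∧ i - (x + 8) < ts.length ∧ (ts.getD (i - (x + 8)) []).getD 0 "" = c then
            (lod[i]?).map (· ++ PySem.Str.join "," fields)
          else lod[i]? := by
  intro ts
  induction ts with
  | nil => intro x lod i; simp [pvInnerA]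
  | cons t ts ih =>
      intro x lod i
      show (pvInnerA G c fields (x + 1) ts
            (if c = "GPRMC" then pvGPRMCWrite lod fields G
             else if t.getD 0 "" = c then
               lod.set (x + 8) (lod.getD (x + 8) "" ++ PySem.Str.join "," fields)
             else lod))[i]? = _
      rw [if_neg hc, ih (x + 1) _ i]
      by_cases heq : i = x + 8
      · subst heq
        rw [if_neg (by omega)]
        by_cases ht : t.getD 0 "" = c
        · rw [if_pos ht, pvSet_append_get, if_pos rfl,
              if_pos ⟨le_refl _, by simp, by simpa using ht⟩]
        · rw [if_neg ht, if_neg (by rintro ⟨-, -, h⟩; rw [Nat.sub_self] at h; exact ht h)]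
      · have hMatch : (if t.getD 0 "" = c then
            lod.set (x + 8) (lod.getD (x + 8) "" ++ PySem.Str.join "," fields)
          else lod)[i]? = lod[i]? := by
          split_ifs with ht
          · rw [pvSet_append_get, if_neg heq]
          · rfl
        rw [hMatch]
        by_cases hlo : x + 8 ≤ i
        · have hgt : x + 1 + 8 ≤ i ↔ True := by constructor <;> intro <;> first | trivial | omega
          have hsub : i - (x + 1 + 8) + 1 = i - (x + 8) := by omega
          have hGetD : ts.getD (i - (x + 1 + 8)) [] = (t :: ts).getD (i - (x + 8)) [] := by
            rw [← hsub]; rfl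
          by_cases hr : i - (x + 1 + 8) < ts.length
          · by_cases htag : (ts.getD (i - (x + 1 + 8)) []).getD 0 "" = c
            · rw [if_pos ⟨by omega, hr, htag⟩, if_pos ⟨hlo, by simp; omega, by rw [← hGetD]; exact htag⟩]
            · rw [if_neg (by rintro ⟨-, -, h⟩; exact htag h),
                  if_neg (by rintro ⟨-, -, h⟩; rw [← hGetD] at h; exact htag h)]
          · rw [if_neg (by rintro ⟨-, h, -⟩; exact hr h), if_neg (by rintro ⟨-, h, -⟩; simp at h; omega)]
        · rw [if_neg (by omega), if_neg (by omega)]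

theorem pvFinishB_insert (g : PySem.Dict String String) (c : String) (fields : List String)
    (G : String) (hc : c ≠ "GPRMC") (ts : List (List String)) (x : Nat) (lod : List String) :
    pvFinishB (g.insert c (g.getD c "" ++ PySem.Str.join "," fields)) x ts lod
      = pvInnerA G c fields x ts (pvFinishB g x ts lod) := by
  apply List.ext_getElem?
  intro i
  rw [pvFinishB_get, pvInnerA_get G c fields hc, pvFinishB_get]
  by_cases hin : x + 8 ≤ i ∧ i - (x + 8) < ts.length
  · by_cases htag : (ts.getD (i - (x + 8)) []).getD 0 "" = c
    · rw [htag]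
      simp only [if_pos hin, PySem.Dict.get?_insert_self]
      cases hg : g.get? c with
      | none =>
          simp only [PySem.Dict.getD_of_get?_eq_none g "" hg, pvApp]
          cases lod[i]? <;> simp [hin]
      | some s0 =>
          simp only [PySem.Dict.getD_of_get?_eq_some g "" hg, pvApp]
          cases lod[i]? <;> simp [hin, String.append_assoc]
    · have h3 : ¬ (x + 8 ≤ i ∧ i - (x + 8) < ts.length ∧ (ts.getD (i - (x + 8)) []).getD 0 "" = c) := by
        rintro ⟨-, -, h⟩; exact htag h
      simp only [if_pos hin, if_neg h3, PySem.Dict.get?_insert_of_ne g _ htag]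
  · have h3 : ¬ (x + 8 ≤ i ∧ i - (x + 8) < ts.length ∧ (ts.getD (i - (x + 8)) []).getD 0 "" = c) := by
      rintro ⟨h1, h2, -⟩; exact hin ⟨h1, h2⟩
    simp only [if_neg hin, if_neg h3]

-- a dict with no retrievable entry leaves the second pass inert
theorem pvFinishB_none (g : PySem.Dict String String) (h : ∀ k, g.get? k = none) :
    ∀ (ts : List (List String)) (x : Nat) (lod : List String),
      pvFinishB g x ts lod = lod := by
  intro ts
  induction ts with
  | nil => intro x lod; rfl
  | cons t ts ih =>
      intro x lod
      show pvFinishB g (x + 1) ts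
            (match g.get? (t.getD 0 "") with
             | some s => lod.set (x + 8) (lod.getD (x + 8) "" ++ s)
             | none => lod) = lod
      rw [h]
      exact ih (x + 1) lod

theorem pvItems_nil_get? (g : PySem.Dict String String) (h : g.items = []) (k : String) :
    g.get? k = none := by
  have : g = PySem.Dict.empty := PySem.Dict.ext (by simpa using h)
  rw [this, PySem.Dict.get?_empty]

-- with an empty tag table A's inner loop is inert
theorem pvA_nil (G : String) :
    ∀ (sd : List String) (lod : List String),
      sd.foldl (fun l line => pvInnerA G (pvCode line) (pvFields line) 0 [] l) lod
        = lod := by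
  intro sd
  induction sd with
  | nil => intro lod; rfl
  | cons line rest ih => intro lod; exact ih lod

theorem pvMain (G : String) (ts : List (List String)) :
    ∀ (sd : List String) (lod : List String) (g : PySem.Dict String String),
      (ts = [] → ∀ line ∈ sd, pvCode line ≠ "GPRMC") →
      pvFinishB (sd.foldl (pvStepB G) (lod, g)).2 0 ts (sd.foldl (pvStepB G) (lod, g)).1
        = sd.foldl
            (fun l line => pvInnerA G (pvCode line) (pvFields line) 0 ts l)
            (pvFinishB g 0 ts lod) := by
  intro sd
  induction sd with
  | nil => intro lod g _; rfl
  | cons line rest ih =>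
      intro lod g hno
      simp only [List.foldl_cons]
      by_cases hc : pvCode line = "GPRMC"
      · have hts : ts ≠ [] := by
          intro h; exact hno h line (by simp) hc
        have hstep : pvStepB G (lod, g) line
            = (pvGPRMCWrite lod (pvFields line) G, g) := by
          unfold pvStepB; rw [pvCodeB_eq, if_pos hc]
        rw [hstep, ih _ g (fun h => absurd h hts), hc,
            pvFinishB_W, pvInnerA_gprmc G _ ts 0 _ hts]
      · have hstep : pvStepB G (lod, g) line
            = (lod, g.insert (pvCode line)
                (g.getD (pvCode line) "" ++ PySem.Str.join "," (pvFields line))) := by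
          unfold pvStepB; rw [pvCodeB_eq, if_neg hc]
        rw [hstep, ih _ _ (fun h line' hm => hno h line' (by simp [hm])),
            pvFinishB_insert g (pvCode line) _ G hc]

-- ===== VERDICT (by name: the statement is the Claim_ definition above) =====
theorem OrderData_spec : Claim_equal_OrderData := by
  intro splitData listOfData NMEA_TAGS GPRMC _ _
  unfold Spec_OrderData OrderData OrderData_alt
  by_cases hts : NMEA_TAGS = []
  · subst hts
    rw [if_pos rfl, pvA_nil]
  · rw [if_neg hts]
    have hguard :
        (if (splitData.foldl (pvStepB GPRMC) (listOfData, PySem.Dict.empty)).2.items = []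
         then (splitData.foldl (pvStepB GPRMC) (listOfData, PySem.Dict.empty)).1
         else pvFinishB (splitData.foldl (pvStepB GPRMC) (listOfData, PySem.Dict.empty)).2 0
                NMEA_TAGS (splitData.foldl (pvStepB GPRMC) (listOfData, PySem.Dict.empty)).1)
          = pvFinishB (splitData.foldl (pvStepB GPRMC) (listOfData, PySem.Dict.empty)).2 0
                NMEA_TAGS (splitData.foldl (pvStepB GPRMC) (listOfData, PySem.Dict.empty)).1 := by
      split_ifs with h
      · rw [pvFinishB_none _ (pvItems_nil_get? _ h)]
      · rfl
    rw [hguard,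
        pvMain GPRMC NMEA_TAGS splitData listOfData PySem.Dict.empty (fun h => absurd h hts),
        pvFinishB_none PySem.Dict.empty (fun k => PySem.Dict.get?_empty k)]
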